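-- pv_equiv track=rewrite | github.com/RyotoMurata/HARMurata2 | spm_wave_compare.py | _iter_label_segments
-- ===== SOURCE A (Python) =====
-- from typing import Dict, Iterable, List, Optional, Sequence, Tuple
--
-- def _iter_label_segments(labels: List[Optional[str]]) -> List[Tuple[int, int, Optional[str]]]:
--     """Return segments (start_idx, end_idx, raw_label) of contiguous identical labels.
--
--     raw_label can be None. Inclusive end index.
--     """
--     segs: List[Tuple[int, int, Optional[str]]] = []
--     if not labels:
--         return segs
--     a = 0
--     cur = labels[0]
--     for i in range(1, len(labels)):
--         if labels[i] != cur: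
--             segs.append((a, i - 1, cur))
--             a = i
--             cur = labels[i]
--     segs.append((a, len(labels) - 1, cur))
--     return segs
-- ===== SOURCE B (Python) =====
-- from typing import List, Optional, Tuple
--
-- def _iter_label_segments(labels: List[Optional[str]]) -> List[Tuple[int, int, Optional[str]]]:
--     """Two-pass: find all change-point boundaries, then materialize segments."""
--     if not labels:
--         return []
--     n = len(labels)
--     bounds = [0] + [i for i in range(1, n) if labels[i] != labels[i - 1]] + [n]
--     return [(s, e - 1, labels[s]) for s, e in zip(bounds, bounds[1:])]
-- ===== Notes on version B (the rewrite author's own statement) =====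
-- stated objective: alternative
-- what changed: Replaces A's fused single-pass loop carrying (segment start, current label, emitted segments) state by a two-pass decomposition: first collect all change-point boundaries, then build the segments by zipping consecutive boundaries.
import Mathlib
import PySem

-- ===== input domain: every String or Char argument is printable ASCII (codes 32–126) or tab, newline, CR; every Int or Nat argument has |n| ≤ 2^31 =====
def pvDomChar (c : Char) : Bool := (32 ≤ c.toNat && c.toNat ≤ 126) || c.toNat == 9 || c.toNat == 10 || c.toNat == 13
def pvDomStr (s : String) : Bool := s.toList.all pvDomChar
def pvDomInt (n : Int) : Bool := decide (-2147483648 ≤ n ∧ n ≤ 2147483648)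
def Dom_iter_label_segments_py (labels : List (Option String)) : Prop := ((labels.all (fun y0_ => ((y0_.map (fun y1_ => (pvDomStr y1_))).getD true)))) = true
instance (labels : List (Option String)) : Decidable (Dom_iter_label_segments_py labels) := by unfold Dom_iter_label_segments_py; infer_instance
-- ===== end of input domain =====

-- B replaces A's fused single-pass grouping loop by a boundary-list two-pass decomposition (alternative, same cost).

-- ===== PORT A =====
-- A's loop body: compare labels[i] with the current segment label, emit a segment on change.
def pvStepA (labels : List (Option String))
    (st : Int × Option String × List (Int × Int × Option String)) (i : Int) :
    Int × Option String × List (Int × Int × Option String) :=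
  let li := (PySem.List.pyGet? labels i).getD none
  if li ≠ st.2.1 then (i, li, st.2.2 ++ [(st.1, i - 1, st.2.1)]) else st

def iter_label_segments_py (labels : List (Option String)) : List (Int × Int × Option String) :=
  if labels = [] then []
  else
    let n : Int := labels.length
    let st := (PySem.List.pyRange 1 n 1).foldl (pvStepA labels)
      (0, (PySem.List.pyGet? labels 0).getD none, [])
    st.2.2 ++ [(st.1, n - 1, st.2.1)]

-- ===== PORT B =====
-- segments from consecutive boundary pairs: zip(bounds, bounds[1:])
def pvZipSeg (labels : List (Option String)) (bs : List Int) : List (Int × Int × Option String) :=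
  (bs.zip bs.tail).map (fun p => (p.1, p.2 - 1, (PySem.List.pyGet? labels p.1).getD none))

def iter_label_segments_py_alt (labels : List (Option String)) : List (Int × Int × Option String) :=
  if labels = [] then []
  else
    let n : Int := labels.length
    let bounds := 0 :: ((PySem.List.pyRange 1 n 1).filter
        (fun i => PySem.List.pyGet? labels i ≠ PySem.List.pyGet? labels (i - 1))) ++ [n]
    pvZipSeg labels bounds

-- ===== PRECONDITION & SPEC =====
def Spec_iter_label_segments_py (labels : List (Option String)) (out : List (Int × Int × Option String)) : Prop := out = iter_label_segments_py_alt labels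
instance (labels : List (Option String)) (out : List (Int × Int × Option String)) : Decidable (Spec_iter_label_segments_py labels out) := by unfold Spec_iter_label_segments_py; infer_instance

-- ===== CLAIM (what is proved, stated in full; the proofs are below) =====
def Claim_equal_iter_label_segments_py : Prop := ∀ (labels : List (Option String)), Dom_iter_label_segments_py labels → Spec_iter_label_segments_py labels (iter_label_segments_py labels)

-- ===== LEMMAS AND PROOFS =====

lemma pvZipSeg_cons₂ (labels : List (Option String)) (s t : Int) (rest : List Int) :
    pvZipSeg labels (s :: t :: rest)
      = (s, t - 1, (PySem.List.pyGet? labels s).getD none) :: pvZipSeg labels (t :: rest) := by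
  simp [pvZipSeg]

-- main generalized invariant
lemma pv_main (labels : List (Option String)) :
    ∀ (k a : Int) (cur : Option String) (segs : List (Int × Int × Option String)),
      1 ≤ k → k ≤ (labels.length : Int) → 0 ≤ a → a < k →
      cur = (PySem.List.pyGet? labels a).getD none →
      cur = (PySem.List.pyGet? labels (k - 1)).getD none →
      (let st := (PySem.List.pyRange k labels.length 1).foldl (pvStepA labels) (a, cur, segs)
       st.2.2 ++ [(st.1, (labels.length : Int) - 1, st.2.1)])
        = segs ++ pvZipSeg labels
            (a :: ((PySem.List.pyRange k labels.length 1).filter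
              (fun i => PySem.List.pyGet? labels i ≠ PySem.List.pyGet? labels (i - 1))) ++ [(labels.length : Int)]) := by
  have hin : ∀ i : Int, 0 ≤ i → i < (labels.length : Int) →
      PySem.List.pyGet? labels i = some ((PySem.List.pyGet? labels i).getD none) := by
    intro i h0 h1
    rw [PySem.List.pyGet?_of_nonneg labels h0]
    have hlt : i.toNat < labels.length := by omega
    simp [List.getElem?_eq_getElem hlt]
  intro k a cur segs hk1 hkn ha0 hak hca hck
  induction hm : ((labels.length : Int) - k).toNat generalizing k a cur segs with
  | zero =>
    have hkn' : k = (labels.length : Int) := by omega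
    subst hkn'
    rw [PySem.List.pyRange_one_eq_nil le_rfl]
    simp [pvZipSeg, hca]
  | succ m ih =>
    have hkb : k < (labels.length : Int) := by omega
    rw [PySem.List.pyRange_one_cons hkb]
    simp only [List.foldl_cons, List.filter_cons]
    have hsk := hin k (by omega) hkb
    have hsk1 := hin (k - 1) (by omega) (by omega)
    by_cases hne : (PySem.List.pyGet? labels k).getD none ≠ cur
    · -- change point at k
      have hpred : (PySem.List.pyGet? labels k ≠ PySem.List.pyGet? labels (k - 1)) := by
        rw [hsk, hsk1, ← hck]
        simpa using hne
      rw [if_pos (by simpa using hpred)]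
      have hstep : pvStepA labels (a, cur, segs) k
          = (k, (PySem.List.pyGet? labels k).getD none, segs ++ [(a, k - 1, cur)]) := by
        simp [pvStepA, hne]
      rw [hstep]
      rw [ih (k + 1) k ((PySem.List.pyGet? labels k).getD none) (segs ++ [(a, k - 1, cur)])
        (by omega) (by omega) (by omega) (by omega) rfl
        (by rw [show k + 1 - 1 = k from by ring]) (by omega)]
      simp only [pvZipSeg_cons₂, ← hca, List.append_assoc, List.nil_append,
        List.cons_append]
    · -- same label, state unchanged
      rw [not_ne_iff] at hne
      have hpred : ¬ (PySem.List.pyGet? labels k ≠ PySem.List.pyGet? labels (k - 1)) := by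
        rw [hsk, hsk1, ← hck, hne]
        simp
      rw [if_neg (by simpa using hpred)]
      have hstep : pvStepA labels (a, cur, segs) k = (a, cur, segs) := by
        simp [pvStepA, hne]
      rw [hstep]
      exact ih (k + 1) a cur segs (by omega) (by omega) ha0 (by omega)
        hca (by rw [show k + 1 - 1 = k from by ring]; exact hne.symm) (by omega)

-- ===== VERDICT (by name: the statement is the Claim_ definition above) =====
theorem iter_label_segments_py_spec : Claim_equal_iter_label_segments_py := by
  intro labels _
  unfold Spec_iter_label_segments_py iter_label_segments_py iter_label_segments_py_alt
  by_cases h : labels = []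
  · simp [h]
  · simp only [h, if_false]
    have hlen : 1 ≤ (labels.length : Int) := by
      have : labels.length ≠ 0 := fun hc => h (List.eq_nil_of_length_eq_zero hc)
      omega
    have := pv_main labels 1 0 ((PySem.List.pyGet? labels 0).getD none) [] le_rfl hlen le_rfl (by norm_num) rfl (by norm_num)
    simpa using this
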